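-- pv_equiv track=rewrite | github.com/csigevirag/beadando | 30.py | rendezo
-- ===== SOURCE A (Python) =====
-- def rendezo(c):
--     li=[]
--     kicsi=[]
--     nagy=[]
--     paros=[]
--     paratlan=[]
--     null=[]
--     egyeb=[]
--     for i in c:
--         li.append(i)
--     for j in li:
--             if "a"<=j<="z":
--                 kicsi.append(j)
--             elif "A"<=j<="Z":
--                 nagy.append(j)
--             elif int(j)%2==0 and int(j)!=0:
--                 paros.append(j)
--             elif int(j)%2!=0:
--                 paratlan.append(j)
--             elif int(j)==0:
--                 null.append(j)
--             else:
--                 egyeb.append(j)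
--     kicsi.sort()
--     nagy.sort()
--     paros.sort()
--     paratlan.sort()
--     null.sort()
--     egyeb.sort()
--     x=kicsi+nagy+paros+paratlan+egyeb+null
--     y=''.join(x)
--     return y
-- ===== SOURCE B (Python) =====
-- def rendezo(c):
--     def cat(ch):
--         if "a" <= ch <= "z":
--             return 0
--         if "A" <= ch <= "Z":
--             return 1
--         d = int(ch)
--         if d % 2 == 0 and d != 0:
--             return 2
--         if d % 2 != 0:
--             return 3
--         return 4
--     return ''.join(sorted(c, key=lambda ch: (cat(ch), ch)))
-- ===== Notes on version B (the rewrite author's own statement) =====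
-- stated objective: simpler
-- what changed: Replaced A's six independently built and independently sorted buckets (plus dead 'egyeb' code) by a single stable sort of the characters under the composite key (category, character).
import Mathlib
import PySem

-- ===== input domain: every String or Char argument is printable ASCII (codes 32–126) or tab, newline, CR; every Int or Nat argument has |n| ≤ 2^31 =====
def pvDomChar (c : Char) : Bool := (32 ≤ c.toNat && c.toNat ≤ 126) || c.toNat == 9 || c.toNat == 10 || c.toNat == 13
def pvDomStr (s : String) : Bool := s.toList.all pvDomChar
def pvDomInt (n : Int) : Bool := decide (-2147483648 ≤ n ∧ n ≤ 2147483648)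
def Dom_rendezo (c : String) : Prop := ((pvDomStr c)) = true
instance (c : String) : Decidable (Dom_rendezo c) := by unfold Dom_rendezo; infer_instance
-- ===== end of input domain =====

-- B replaces A's six independently sorted buckets by one stable sort under the
-- composite key (category, character); objective: simpler.

-- `int(j)` on a one-character string (both Pythons call it on the same characters;
-- within Pre_ those are digits, where ofStr? returns some value, so getD is never the default)
def pyIntChar (j : Char) : Int := (PySem.Int.ofStr? (String.singleton j)).getD 0

-- ===== PORT A =====
-- the body of A's classification loop: one step appending j to the right bucket
def bucketStep (s : List Char × List Char × List Char × List Char × List Char × List Char)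
    (j : Char) : List Char × List Char × List Char × List Char × List Char × List Char :=
  if 'a' ≤ j ∧ j ≤ 'z' then (s.1 ++ [j], s.2.1, s.2.2.1, s.2.2.2.1, s.2.2.2.2.1, s.2.2.2.2.2)
  else if 'A' ≤ j ∧ j ≤ 'Z' then (s.1, s.2.1 ++ [j], s.2.2.1, s.2.2.2.1, s.2.2.2.2.1, s.2.2.2.2.2)
  else if PySem.Int.mod (pyIntChar j) 2 = 0 ∧ pyIntChar j ≠ 0 then
    (s.1, s.2.1, s.2.2.1 ++ [j], s.2.2.2.1, s.2.2.2.2.1, s.2.2.2.2.2)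
  else if PySem.Int.mod (pyIntChar j) 2 ≠ 0 then
    (s.1, s.2.1, s.2.2.1, s.2.2.2.1 ++ [j], s.2.2.2.2.1, s.2.2.2.2.2)
  else if pyIntChar j = 0 then
    (s.1, s.2.1, s.2.2.1, s.2.2.2.1, s.2.2.2.2.1 ++ [j], s.2.2.2.2.2)
  else (s.1, s.2.1, s.2.2.1, s.2.2.2.1, s.2.2.2.2.1, s.2.2.2.2.2 ++ [j])

def rendezo (c : String) : String :=
  let li : List Char := c.toList.foldl (fun acc i => acc ++ [i]) []
  match li.foldl bucketStep ([], [], [], [], [], []) with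
  | (kicsi, nagy, paros, paratlan, null, egyeb) =>
    String.mk (PySem.List.sorted kicsi (fun x => x) ++ PySem.List.sorted nagy (fun x => x) ++
      PySem.List.sorted paros (fun x => x) ++ PySem.List.sorted paratlan (fun x => x) ++
      PySem.List.sorted egyeb (fun x => x) ++ PySem.List.sorted null (fun x => x))

-- ===== PORT B =====
-- B's cat helper
def catChar (ch : Char) : Int :=
  if 'a' ≤ ch ∧ ch ≤ 'z' then 0
  else if 'A' ≤ ch ∧ ch ≤ 'Z' then 1
  else if PySem.Int.mod (pyIntChar ch) 2 = 0 ∧ pyIntChar ch ≠ 0 then 2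
  else if PySem.Int.mod (pyIntChar ch) 2 ≠ 0 then 3
  else 4

def rendezo_alt (c : String) : String :=
  String.mk (PySem.List.sorted2 c.toList catChar (fun ch => ch))

-- ===== PRECONDITION & SPEC =====
-- Pre_ excludes exactly the strings containing a character that is neither an ASCII letter
-- nor a digit: on those A's `int(j)` raises ValueError (B raises the same way).
def Pre_rendezo (c : String) : Prop :=
  ∀ ch ∈ c.toList, ('a' ≤ ch ∧ ch ≤ 'z') ∨ ('A' ≤ ch ∧ ch ≤ 'Z') ∨ ('0' ≤ ch ∧ ch ≤ '9')
instance (c : String) : Decidable (Pre_rendezo c) := by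
  unfold Pre_rendezo; exact List.decidableBAll _ _

def pvWitness_rendezo : String := "b3A0a2Z19"

def Spec_rendezo (c : String) (out : String) : Prop := out = rendezo_alt c
instance (c : String) (out : String) : Decidable (Spec_rendezo c out) := by
  unfold Spec_rendezo; infer_instance

-- ===== CLAIM (what is proved, stated in full; the proofs are below) =====
def Claim_equal_rendezo : Prop := ∀ (c : String), Dom_rendezo c → Pre_rendezo c → Spec_rendezo c (rendezo c)

-- ===== LEMMAS AND PROOFS =====

-- the combined key: category then character, packed into one Int
def combKey (ch : Char) : Int := catChar ch * 4294967296 + (ch.toNat : Int)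

theorem catChar_cases (ch : Char) :
    catChar ch = 0 ∨ catChar ch = 1 ∨ catChar ch = 2 ∨ catChar ch = 3 ∨ catChar ch = 4 := by
  unfold catChar; split_ifs <;> norm_num

theorem catChar_bounds (ch : Char) : 0 ≤ catChar ch ∧ catChar ch ≤ 4 := by
  rcases catChar_cases ch with h | h | h | h | h <;> rw [h] <;> norm_num

theorem toNat_lt (ch : Char) : (ch.toNat : Int) < 4294967296 := by
  have := UInt32.toNat_lt_size ch.val
  have : ch.toNat < 4294967296 := this
  omega

theorem toNat_nonneg (ch : Char) : 0 ≤ (ch.toNat : Int) := by positivity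

theorem char_lt_iff (a b : Char) : a < b ↔ (a.toNat : Int) < (b.toNat : Int) := by
  rw [Char.lt_def, UInt32.lt_iff_toNat_lt]
  exact_mod_cast Iff.rfl

theorem char_le_iff (a b : Char) : a ≤ b ↔ (a.toNat : Int) ≤ (b.toNat : Int) := by
  rw [Char.le_def, UInt32.le_iff_toNat_le]
  exact_mod_cast Iff.rfl

theorem combKey_lt_iff (a b : Char) :
    combKey a < combKey b ↔ (catChar a < catChar b ∨ (¬ catChar b < catChar a ∧ a < b)) := by
  have ha := catChar_bounds a; have hb := catChar_bounds b
  have ha' := toNat_lt a; have hb' := toNat_lt b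
  have ha'' := toNat_nonneg a; have hb'' := toNat_nonneg b
  rw [char_lt_iff]; unfold combKey
  constructor
  · intro h; omega
  · intro h; omega

theorem combKey_inj : Function.Injective combKey := by
  intro a b h
  have ha := catChar_bounds a; have hb := catChar_bounds b
  have ha' := toNat_lt a; have hb' := toNat_lt b
  have ha'' := toNat_nonneg a; have hb'' := toNat_nonneg b
  unfold combKey at h
  have : (a.toNat : Int) = (b.toNat : Int) := by omega
  have : a.toNat = b.toNat := by exact_mod_cast this
  exact Char.ext (UInt32.toNat_inj.mp this)

theorem sorted2_eq_sorted_combKey (xs : List Char) :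
    PySem.List.sorted2 xs catChar (fun ch => ch) = PySem.List.sorted xs combKey := by
  rw [PySem.List.sorted_eq_foldl_insertBy]
  show List.foldl (fun acc x => PySem.List.insertBy _ x acc) [] xs = _
  congr 1
  funext acc x
  congr 1
  funext a b
  have : (decide (catChar a < catChar b) || (!decide (catChar b < catChar a) && decide (a < b)))
      = decide (combKey a < combKey b) := by
    rw [Bool.eq_iff_iff]
    simp only [Bool.or_eq_true, Bool.and_eq_true, Bool.not_eq_true', decide_eq_true_eq,
      decide_eq_false_iff_not]
    rw [combKey_lt_iff]
  exact this

theorem foldl_append_eq (l : List Char) (acc : List Char) :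
    l.foldl (fun acc i => acc ++ [i]) acc = acc ++ l := by
  induction l generalizing acc with
  | nil => simp
  | cons x t ih => simp [List.foldl_cons, ih]

-- the classification loop produces exactly the catChar-filters, and egyeb stays empty
theorem buckets_eq (l : List Char) (k n p q z e : List Char) :
    l.foldl bucketStep (k, n, p, q, z, e) =
      (k ++ l.filter (fun ch => catChar ch == 0),
       n ++ l.filter (fun ch => catChar ch == 1),
       p ++ l.filter (fun ch => catChar ch == 2),
       q ++ l.filter (fun ch => catChar ch == 3),
       z ++ l.filter (fun ch => catChar ch == 4),
       e) := by
  induction l generalizing k n p q z e with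
  | nil => simp
  | cons j t ih =>
    simp only [List.foldl_cons, List.filter_cons]
    by_cases h1 : 'a' ≤ j ∧ j ≤ 'z'
    · have hs : bucketStep (k, n, p, q, z, e) j = (k ++ [j], n, p, q, z, e) := by
        unfold bucketStep; rw [if_pos h1]
      have hc : catChar j = 0 := by unfold catChar; rw [if_pos h1]
      rw [hs, ih]; simp [hc]
    · by_cases h2 : 'A' ≤ j ∧ j ≤ 'Z'
      · have hs : bucketStep (k, n, p, q, z, e) j = (k, n ++ [j], p, q, z, e) := by
          unfold bucketStep; rw [if_neg h1, if_pos h2]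
        have hc : catChar j = 1 := by unfold catChar; rw [if_neg h1, if_pos h2]
        rw [hs, ih]; simp [hc]
      · by_cases h3 : PySem.Int.mod (pyIntChar j) 2 = 0 ∧ pyIntChar j ≠ 0
        · have hs : bucketStep (k, n, p, q, z, e) j = (k, n, p ++ [j], q, z, e) := by
            unfold bucketStep; rw [if_neg h1, if_neg h2, if_pos h3]
          have hc : catChar j = 2 := by unfold catChar; rw [if_neg h1, if_neg h2, if_pos h3]
          rw [hs, ih]; simp [hc]
        · by_cases h4 : PySem.Int.mod (pyIntChar j) 2 ≠ 0
          · have hs : bucketStep (k, n, p, q, z, e) j = (k, n, p, q ++ [j], z, e) := by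
              unfold bucketStep; rw [if_neg h1, if_neg h2, if_neg h3, if_pos h4]
            have hc : catChar j = 3 := by
              unfold catChar; rw [if_neg h1, if_neg h2, if_neg h3, if_pos h4]
            rw [hs, ih]; simp [hc]
          · have h5 : pyIntChar j = 0 := by tauto
            have hs : bucketStep (k, n, p, q, z, e) j = (k, n, p, q, z ++ [j], e) := by
              unfold bucketStep; rw [if_neg h1, if_neg h2, if_neg h3, if_neg h4, if_pos h5]
            have hc : catChar j = 4 := by
              unfold catChar; rw [if_neg h1, if_neg h2, if_neg h3, if_neg h4]
            rw [hs, ih]; simp [hc]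

-- count of a char in the filter selecting its own category is its full count; in others, 0
theorem count_filter_cat (x : Char) (l : List Char) (i : Int) :
    List.count x (l.filter (fun ch => catChar ch == i)) =
      if catChar x = i then List.count x l else 0 := by
  by_cases h : catChar x = i
  · rw [if_pos h, List.count_filter]
    simp [h]
  · rw [if_neg h, List.count_eq_zero]
    intro hx
    rw [List.mem_filter] at hx
    exact h (by simpa using hx.2)

theorem filters_perm (l : List Char) :
    (l.filter (fun ch => catChar ch == 0) ++ l.filter (fun ch => catChar ch == 1) ++
     l.filter (fun ch => catChar ch == 2) ++ l.filter (fun ch => catChar ch == 3) ++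
     l.filter (fun ch => catChar ch == 4)).Perm l := by
  rw [List.perm_iff_count]
  intro x
  simp only [List.count_append, count_filter_cat]
  rcases catChar_cases x with h | h | h | h | h <;> simp [h]

theorem mem_sorted_filter (i : Int) (l : List Char) (x : Char)
    (hx : x ∈ PySem.List.sorted (l.filter (fun ch => catChar ch == i)) (fun y => y)) :
    catChar x = i := by
  rw [PySem.List.mem_sorted, List.mem_filter] at hx
  simpa using hx.2

theorem combKey_le_within (a b : Char) (h : catChar a = catChar b) (hab : a ≤ b) :
    combKey a ≤ combKey b := by
  rw [char_le_iff] at hab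
  unfold combKey
  omega

theorem combKey_le_cross (a b : Char) (h : catChar a < catChar b) : combKey a ≤ combKey b := by
  have ha' := toNat_lt a; have hb' := toNat_lt b
  have ha'' := toNat_nonneg a; have hb'' := toNat_nonneg b
  unfold combKey
  omega

theorem pairwise_sorted_filter (i : Int) (l : List Char) :
    (PySem.List.sorted (l.filter (fun ch => catChar ch == i)) (fun y => y)).Pairwise
      (fun a b => combKey a ≤ combKey b) := by
  have := PySem.List.sorted_pairwise (l.filter (fun ch => catChar ch == i)) (fun y : Char => y)
  refine this.imp_of_mem ?_
  intro a b ha hb hab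
  exact combKey_le_within a b
    (by rw [mem_sorted_filter i l a ha, mem_sorted_filter i l b hb]) hab

theorem pairwise_concat (l : List Char) :
    (PySem.List.sorted (l.filter (fun ch => catChar ch == 0)) (fun y => y) ++
     PySem.List.sorted (l.filter (fun ch => catChar ch == 1)) (fun y => y) ++
     PySem.List.sorted (l.filter (fun ch => catChar ch == 2)) (fun y => y) ++
     PySem.List.sorted (l.filter (fun ch => catChar ch == 3)) (fun y => y) ++
     PySem.List.sorted (l.filter (fun ch => catChar ch == 4)) (fun y => y)).Pairwise
      (fun a b => combKey a ≤ combKey b) := by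
  have cross : ∀ (i j : Int), i < j → ∀ a, catChar a = i → ∀ b, catChar b = j →
      combKey a ≤ combKey b := by
    intro i j hij a ha b hb
    exact combKey_le_cross a b (by omega)
  simp only [List.pairwise_append]
  refine ⟨⟨⟨⟨pairwise_sorted_filter 0 l, pairwise_sorted_filter 1 l, ?_⟩,
    pairwise_sorted_filter 2 l, ?_⟩, pairwise_sorted_filter 3 l, ?_⟩,
    pairwise_sorted_filter 4 l, ?_⟩
  · intro a ha b hb
    exact cross 0 1 (by norm_num) a (mem_sorted_filter 0 l a ha) b (mem_sorted_filter 1 l b hb)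
  · intro a ha b hb
    rcases List.mem_append.mp ha with ha | ha
    · exact cross 0 2 (by norm_num) a (mem_sorted_filter 0 l a ha) b (mem_sorted_filter 2 l b hb)
    · exact cross 1 2 (by norm_num) a (mem_sorted_filter 1 l a ha) b (mem_sorted_filter 2 l b hb)
  · intro a ha b hb
    rcases List.mem_append.mp ha with ha | ha
    · rcases List.mem_append.mp ha with ha | ha
      · exact cross 0 3 (by norm_num) a (mem_sorted_filter 0 l a ha) b (mem_sorted_filter 3 l b hb)
      · exact cross 1 3 (by norm_num) a (mem_sorted_filter 1 l a ha) b (mem_sorted_filter 3 l b hb)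
    · exact cross 2 3 (by norm_num) a (mem_sorted_filter 2 l a ha) b (mem_sorted_filter 3 l b hb)
  · intro a ha b hb
    rcases List.mem_append.mp ha with ha | ha
    · rcases List.mem_append.mp ha with ha | ha
      · rcases List.mem_append.mp ha with ha | ha
        · exact cross 0 4 (by norm_num) a (mem_sorted_filter 0 l a ha) b
            (mem_sorted_filter 4 l b hb)
        · exact cross 1 4 (by norm_num) a (mem_sorted_filter 1 l a ha) b
            (mem_sorted_filter 4 l b hb)
      · exact cross 2 4 (by norm_num) a (mem_sorted_filter 2 l a ha) b
          (mem_sorted_filter 4 l b hb)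
    · exact cross 3 4 (by norm_num) a (mem_sorted_filter 3 l a ha) b (mem_sorted_filter 4 l b hb)

theorem concat_perm (l : List Char) :
    (PySem.List.sorted (l.filter (fun ch => catChar ch == 0)) (fun y => y) ++
     PySem.List.sorted (l.filter (fun ch => catChar ch == 1)) (fun y => y) ++
     PySem.List.sorted (l.filter (fun ch => catChar ch == 2)) (fun y => y) ++
     PySem.List.sorted (l.filter (fun ch => catChar ch == 3)) (fun y => y) ++
     PySem.List.sorted (l.filter (fun ch => catChar ch == 4)) (fun y => y)).Perm l := by
  have h : ∀ i : Int, (PySem.List.sorted (l.filter (fun ch => catChar ch == i))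
      (fun y : Char => y)).Perm (l.filter (fun ch => catChar ch == i)) :=
    fun i => PySem.List.sorted_perm _ _ _
  exact (((((h 0).append (h 1)).append (h 2)).append (h 3)).append (h 4)).trans (filters_perm l)

theorem main_eq (l : List Char) :
    PySem.List.sorted l combKey =
      PySem.List.sorted (l.filter (fun ch => catChar ch == 0)) (fun y => y) ++
      PySem.List.sorted (l.filter (fun ch => catChar ch == 1)) (fun y => y) ++
      PySem.List.sorted (l.filter (fun ch => catChar ch == 2)) (fun y => y) ++
      PySem.List.sorted (l.filter (fun ch => catChar ch == 3)) (fun y => y) ++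
      PySem.List.sorted (l.filter (fun ch => catChar ch == 4)) (fun y => y) := by
  rw [PySem.List.sorted_eq_sorted_of_perm l _ combKey combKey_inj (concat_perm l).symm]
  exact PySem.List.sorted_eq_self_of_pairwise _ _ (pairwise_concat l)

-- ===== VERDICT (by name: the statement is the Claim_ definition above) =====
theorem rendezo_spec : Claim_equal_rendezo := by
  intro c _ _
  show rendezo c = rendezo_alt c
  simp only [rendezo, rendezo_alt, foldl_append_eq, List.nil_append, buckets_eq]
  rw [sorted2_eq_sorted_combKey, main_eq]
  have he : (PySem.List.sorted ([] : List Char) (fun x => x)) = [] := rfl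
  rw [he]
  simp
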